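-- pv_equiv track=rewrite | github.com/i960107/algorithm | programmers/level2_영어끝말잇기.py | solution
-- ===== SOURCE A (Python) =====
-- from typing import List
--
-- def solution(n: int, words: List[str]) -> List[int]:
--     answer = [0, 0]
--     words_set = set()
--     i = 0
--     prev = None
--     while i < len(words):
--         curr = words[i]
--         if len(curr) <= 1 or (prev and prev[-1] != curr[0]) or (curr in words_set):
--             # 탈락하는 경우
--             answer = [(i % n) + 1, i // n + 1]
--             break
--         else:
--             words_set.add(curr)
--             prev = curr
--             i += 1
--
--     return answer
-- ===== SOURCE B (Python) =====
-- def solution(n, words):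
--     # three independent first-failure scans, combined by min()
--     short = next((i for i, w in enumerate(words) if len(w) <= 1), None)
--     chain = next((i for i, (a, b) in enumerate(zip(words, words[1:]), 1)
--                   if a and b and a[-1] != b[0]), None)
--     dup = None
--     seen = set()
--     for i, w in enumerate(words):
--         if w in seen:
--             dup = i
--             break
--         seen.add(w)
--     cands = [c for c in (short, chain, dup) if c is not None]
--     if not cands:
--         return [0, 0]
--     i = min(cands)
--     return [i % n + 1, i // n + 1]
-- ===== Notes on version B (the rewrite author's own statement) =====
-- stated objective: alternative
-- what changed: Replaces A's fused stop-at-first-failure while-loop (which threads prev and a seen-set together and checks all three elimination rules at once) by three independent first-failure scans — first too-short word, first chain break over adjacent pairs, first duplicate — combined with min() and mapped through the same answer formula.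
import Mathlib
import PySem

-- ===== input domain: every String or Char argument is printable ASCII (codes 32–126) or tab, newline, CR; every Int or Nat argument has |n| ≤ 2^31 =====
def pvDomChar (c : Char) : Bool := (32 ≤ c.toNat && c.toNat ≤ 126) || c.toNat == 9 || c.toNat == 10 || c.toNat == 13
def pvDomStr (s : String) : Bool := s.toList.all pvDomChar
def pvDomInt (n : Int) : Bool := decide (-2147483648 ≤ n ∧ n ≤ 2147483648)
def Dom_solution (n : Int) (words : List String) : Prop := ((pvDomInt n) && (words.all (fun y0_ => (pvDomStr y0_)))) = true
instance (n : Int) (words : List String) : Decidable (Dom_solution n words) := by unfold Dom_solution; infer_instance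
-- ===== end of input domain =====

-- B replaces A's fused stop-at-first-failure loop by three independent first-failure
-- scans (short word / chain break / first duplicate) combined with min() (objective: alternative).

-- ===== PORT A =====
-- A's while loop: index i, prev word (None at start), set of seen words
def solutionGo (n : Int) (words : List String) (i : Nat) (prev : Option String)
    (wset : PySem.Set String) : List Int :=
  if _h : i < words.length then
    let curr := words[i]
    if decide (PySem.Str.len curr ≤ 1) ||
        (match prev with
         | some p => decide (p ≠ "") && decide (PySem.Str.pyGet? p (-1) ≠ PySem.Str.pyGet? curr 0)
         | none => false) ||
        PySem.Set.contains wset curr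
    then [PySem.Int.mod (i : Int) n + 1, PySem.Int.floordiv (i : Int) n + 1]
    else solutionGo n words (i + 1) (some curr) (PySem.Set.add wset curr)
  else [0, 0]
termination_by words.length - i

def solution (n : Int) (words : List String) : List Int :=
  solutionGo n words 0 none PySem.Set.empty

-- ===== PORT B =====
-- first index of a word of length <= 1
def findShortIdx : List String → Nat → Option Nat
  | [], _ => none
  | w :: rest, i =>
    if PySem.Str.len w ≤ 1 then some i else findShortIdx rest (i + 1)

-- first index k ≥ i+1 whose adjacent pair breaks the chain (zip(words, words[1:]))
def findChainIdx : List String → Nat → Option Nat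
  | a :: b :: rest, i =>
    if a ≠ "" ∧ b ≠ "" ∧ PySem.Str.pyGet? a (-1) ≠ PySem.Str.pyGet? b 0
    then some (i + 1)
    else findChainIdx (b :: rest) (i + 1)
  | _, _ => none

-- first index of a word already seen
def findDupIdx : List String → Nat → PySem.Set String → Option Nat
  | [], _, _ => none
  | w :: rest, i, seen =>
    if PySem.Set.contains seen w then some i
    else findDupIdx rest (i + 1) (PySem.Set.add seen w)

def solution_alt (n : Int) (words : List String) : List Int :=
  let short := findShortIdx words 0
  let chain := findChainIdx words 0
  let dup := findDupIdx words 0 PySem.Set.empty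
  let cands := [short, chain, dup].filterMap id
  match cands.min? with
  | none => [0, 0]
  | some i => [PySem.Int.mod (i : Int) n + 1, PySem.Int.floordiv (i : Int) n + 1]

-- ===== PRECONDITION & SPEC =====
-- Python A raises ZeroDivisionError exactly when n = 0 and some player is eliminated;
-- Pre_ admits every n ≠ 0, and for n = 0 exactly the games with no elimination (A returns [0,0] there).
def Pre_solution (n : Int) (words : List String) : Prop :=
  n ≠ 0 ∨ ((∀ w ∈ words, 2 ≤ PySem.Str.len w) ∧
           List.IsChain (fun a b => PySem.Str.pyGet? a (-1) = PySem.Str.pyGet? b 0) words ∧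
           words.Nodup)
instance (n : Int) (words : List String) : Decidable (Pre_solution n words) := by
  unfold Pre_solution; infer_instance

def pvWitness_solution : Int × List String := (2, ["ab", "bc", "cd"])

def Spec_solution (n : Int) (words : List String) (out : List Int) : Prop := out = solution_alt n words
instance (n : Int) (words : List String) (out : List Int) : Decidable (Spec_solution n words out) := by unfold Spec_solution; infer_instance

-- ===== CLAIM (what is proved, stated in full; the proofs are below) =====
def Claim_equal_solution : Prop := ∀ (n : Int) (words : List String), Dom_solution n words → Pre_solution n words → Spec_solution n words (solution n words)

-- ===== LEMMAS AND PROOFS =====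

-- the elimination answer for index k
def answerOf (n : Int) (k : Nat) : List Int :=
  [PySem.Int.mod (k : Int) n + 1, PySem.Int.floordiv (k : Int) n + 1]

def resOf (n : Int) (o : Option Nat) : List Int :=
  match o with
  | none => [0, 0]
  | some k => answerOf n k

-- pointwise failure conditions, indexed over the full list
def pShort (ws : List String) (k : Nat) : Bool := decide (PySem.Str.len (ws.getD k "") ≤ 1)
def pMism (ws : List String) (k : Nat) : Bool :=
  decide (PySem.Str.pyGet? (ws.getD (k - 1) "") (-1) ≠ PySem.Str.pyGet? (ws.getD k "") 0)
def pChainMid (ws : List String) (k : Nat) : Bool :=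
  decide (ws.getD (k - 1) "" ≠ "") && pMism ws k
def pChainG (ws : List String) (k : Nat) : Bool :=
  decide (ws.getD (k - 1) "" ≠ "") && decide (ws.getD k "" ≠ "") && pMism ws k
def pDup (ws : List String) (k : Nat) : Bool := decide (ws.getD k "" ∈ ws.take k)
def pAll (ws : List String) (k : Nat) : Bool :=
  pShort ws k || ((decide (1 ≤ k) && pChainMid ws k) || pDup ws k)

-- least index ≥ i below len satisfying P
def firstFrom (len : Nat) (P : Nat → Bool) (i : Nat) : Option Nat :=
  if i < len then (if P i then some i else firstFrom len P (i + 1)) else none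
termination_by len - i

def min2 : Option Nat → Option Nat → Option Nat
  | none, b => b
  | some a, none => some a
  | some a, some b => some (min a b)

lemma firstFrom_eq (len : Nat) (P : Nat → Bool) (i : Nat) :
    firstFrom len P i = if i < len then (if P i then some i else firstFrom len P (i + 1)) else none := by
  rw [firstFrom]

lemma firstFrom_ge (len : Nat) (P : Nat → Bool) :
    ∀ m i j, len - i = m → firstFrom len P i = some j → i ≤ j := by
  intro m
  induction m with
  | zero =>
    intro i j h hf
    rw [firstFrom_eq, if_neg (by omega)] at hf; exact absurd hf (by simp)
  | succ m ih =>
    intro i j h hf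
    by_cases hi : i < len
    · rw [firstFrom_eq, if_pos hi] at hf
      by_cases hp : P i
      · simp [hp] at hf; omega
      · simp [hp] at hf; have := ih (i+1) j (by omega) hf; omega
    · rw [firstFrom_eq, if_neg hi] at hf; exact absurd hf (by simp)

lemma firstFrom_congr (len : Nat) (P Q : Nat → Bool) :
    ∀ m i, len - i = m → (∀ k, i ≤ k → P k = Q k) → firstFrom len P i = firstFrom len Q i := by
  intro m
  induction m with
  | zero =>
    intro i h hpq
    rw [firstFrom_eq len P, firstFrom_eq len Q, if_neg (by omega), if_neg (by omega)]
  | succ m ih =>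
    intro i h hpq
    by_cases hi : i < len
    · rw [firstFrom_eq len P, firstFrom_eq len Q, if_pos hi, if_pos hi, hpq i (Nat.le_refl i),
        ih (i+1) (by omega) (fun k hk => hpq k (by omega))]
    · rw [firstFrom_eq len P, firstFrom_eq len Q, if_neg hi, if_neg hi]

lemma firstFrom_or (len : Nat) (P Q : Nat → Bool) :
    ∀ m i, len - i = m →
      firstFrom len (fun k => P k || Q k) i = min2 (firstFrom len P i) (firstFrom len Q i) := by
  intro m
  induction m with
  | zero =>
    intro i h
    rw [firstFrom_eq len _, firstFrom_eq len P, firstFrom_eq len Q, if_neg (by omega),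
      if_neg (by omega), if_neg (by omega)]
    rfl
  | succ m ih =>
    intro i h
    by_cases hi : i < len
    · rw [firstFrom_eq len _, firstFrom_eq len P, firstFrom_eq len Q, if_pos hi, if_pos hi, if_pos hi]
      by_cases hp : P i
      · by_cases hq : Q i
        · simp [hp, hq, min2]
        · rw [if_pos (by simp [hp]), if_pos hp, if_neg (by simp [hq])]
          cases hfq : firstFrom len Q (i+1) with
          | none => simp [min2]
          | some j =>
            have := firstFrom_ge len Q (len - (i+1)) (i+1) j rfl hfq
            simp [min2]; omega
      · by_cases hq : Q i
        · rw [if_pos (by simp [hp, hq]), if_neg (by simp [hp]), if_pos hq]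
          cases hfp : firstFrom len P (i+1) with
          | none => simp [min2]
          | some j =>
            have := firstFrom_ge len P (len - (i+1)) (i+1) j rfl hfp
            simp [min2]; omega
        · rw [if_neg (by simp [hp, hq]), if_neg (by simp [hp]), if_neg (by simp [hq])]
          exact ih (i+1) (by omega)
    · rw [firstFrom_eq len _, firstFrom_eq len P, firstFrom_eq len Q, if_neg hi, if_neg hi, if_neg hi]
      rfl

lemma firstFrom_shift (len : Nat) (Q : Nat → Bool) :
    firstFrom len (fun k => decide (1 ≤ k) && Q k) 0 = firstFrom len Q 1 := by
  by_cases h0 : 0 < len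
  · rw [firstFrom_eq, if_pos h0]
    rw [if_neg (by simp)]
    exact firstFrom_congr len _ Q (len - 1) 1 rfl (fun k hk => by simp [hk])
  · rw [firstFrom_eq len _, firstFrom_eq len Q, if_neg h0, if_neg (by omega)]

lemma pAll_eq_guarded (words : List String) (k : Nat) :
    pAll words k = (pShort words k || ((decide (1 ≤ k) && pChainG words k) || pDup words k)) := by
  by_cases hsh : pShort words k = true
  · simp [pAll, hsh]
  · have hne : words.getD k "" ≠ "" := by
      intro he
      apply hsh
      unfold pShort
      rw [he]
      decide
    unfold pAll pChainMid pChainG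
    rw [decide_eq_true hne, Bool.and_true]

lemma loopA_eq (n : Int) (words : List String) :
    ∀ m i prev s, words.length - i = m →
      prev = (if i = 0 then none else some (words.getD (i - 1) "")) →
      (∀ w : String, w ∈ s ↔ w ∈ words.take i) →
      solutionGo n words i prev s = resOf n (firstFrom words.length (pAll words) i) := by
  intro m
  induction m with
  | zero =>
    intro i prev s h hprev hs
    rw [solutionGo, dif_neg (by omega), firstFrom_eq, if_neg (by omega)]
    rfl
  | succ m ih =>
    intro i prev s h hprev hs
    have hi : i < words.length := by omega
    have hget : words.getD i "" = words[i] := List.getD_eq_getElem _ _ hi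
    have hcont : PySem.Set.contains s words[i] = pDup words i := by
      by_cases hd : words[i] ∈ words.take i
      · rw [(PySem.Set.contains_iff _ _).mpr ((hs _).mpr hd)]
        unfold pDup
        rw [hget]
        simp [hd]
      · have h1 : PySem.Set.contains s words[i] = false := by
          cases hcb : PySem.Set.contains s words[i] with
          | false => rfl
          | true => exact absurd ((hs _).mp ((PySem.Set.contains_iff _ _).mp hcb)) hd
        rw [h1]
        unfold pDup
        rw [hget]
        simp [hd]
    have hrec : solutionGo n words (i+1) (some words[i]) (PySem.Set.add s words[i])
        = resOf n (firstFrom words.length (pAll words) (i+1)) := by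
      refine ih (i+1) _ _ (by omega) (by simp [List.getElem?_eq_getElem hi]) ?_
      intro w
      rw [PySem.Set.mem_add, hs w, List.take_add_one, List.getElem?_eq_getElem hi,
        Option.toList_some, List.mem_append, List.mem_singleton]
    rw [solutionGo, dif_pos hi, firstFrom_eq, if_pos hi]
    dsimp only
    subst hprev
    rcases Nat.eq_zero_or_pos i with h0 | h1
    · subst h0
      have hpr : (if (0:Nat) = 0 then (none : Option String) else some (words.getD (0-1) "")) = none := rfl
      rw [hpr]
      have hc0 : (decide (PySem.Str.len words[0] ≤ 1) ||
          false || PySem.Set.contains s words[0]) = pAll words 0 := by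
        rw [hcont]
        simp [pAll, pShort, List.getElem?_eq_getElem hi]
      rw [hc0]
      by_cases hall : pAll words 0 = true
      · rw [if_pos hall, if_pos hall]
        rfl
      · rw [if_neg hall, if_neg hall]
        exact hrec
    · have hpr : (if i = 0 then (none : Option String) else some (words.getD (i-1) ""))
          = some (words.getD (i-1) "") := by rw [if_neg (by omega)]
      rw [hpr]
      have h1' : (1:Nat) ≤ i := h1
      have hc1 : (decide (PySem.Str.len words[i] ≤ 1) ||
          (decide (words.getD (i-1) "" ≠ "") &&
            decide (PySem.Str.pyGet? (words.getD (i-1) "") (-1) ≠ PySem.Str.pyGet? words[i] 0)) ||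
          PySem.Set.contains s words[i]) = pAll words i := by
        rw [hcont]
        simp only [pAll, pShort, pChainMid, pMism, hget, h1', decide_true, Bool.true_and]
        rw [Bool.or_assoc]
      rw [hc1]
      by_cases hall : pAll words i = true
      · rw [if_pos hall, if_pos hall]
        rfl
      · rw [if_neg hall, if_neg hall]
        exact hrec

lemma findShort_eq (words : List String) :
    ∀ m i, words.length - i = m →
      findShortIdx (words.drop i) i = firstFrom words.length (pShort words) i := by
  intro m
  induction m with
  | zero =>
    intro i h
    rw [List.drop_eq_nil_of_le (by omega), firstFrom_eq, if_neg (by omega)]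
    rfl
  | succ m ih =>
    intro i h
    have hi : i < words.length := by omega
    have hget : words.getD i "" = words[i] := List.getD_eq_getElem _ _ hi
    rw [List.drop_eq_getElem_cons hi]
    simp only [findShortIdx]
    rw [firstFrom_eq, if_pos hi]
    by_cases hp : PySem.Str.len words[i] ≤ 1
    · rw [if_pos hp, if_pos (by unfold pShort; rw [hget]; simpa using hp)]
    · rw [if_neg hp, if_neg (by unfold pShort; rw [hget]; simpa using hp)]
      exact ih (i+1) (by omega)

lemma findChain_eq (words : List String) :
    ∀ m i, words.length - i = m →
      findChainIdx (words.drop i) i = firstFrom words.length (pChainG words) (i + 1) := by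
  intro m
  induction m with
  | zero =>
    intro i h
    rw [List.drop_eq_nil_of_le (by omega), firstFrom_eq, if_neg (by omega)]
    rfl
  | succ m ih =>
    intro i h
    have hi : i < words.length := by omega
    by_cases h2 : i + 1 < words.length
    · have hgi : words.getD i "" = words[i] := List.getD_eq_getElem _ _ hi
      have hgi1 : words.getD (i+1) "" = words[i+1] := List.getD_eq_getElem _ _ h2
      rw [List.drop_eq_getElem_cons hi, List.drop_eq_getElem_cons h2]
      simp only [findChainIdx]
      rw [firstFrom_eq, if_pos h2]
      have hgO : words[i]?.getD "" = words[i] := by simp [List.getElem?_eq_getElem hi]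
      have hg1O : words[i+1]?.getD "" = words[i+1] := by simp [List.getElem?_eq_getElem h2]
      by_cases hc : words[i] ≠ "" ∧ words[i+1] ≠ "" ∧
          PySem.Str.pyGet? words[i] (-1) ≠ PySem.Str.pyGet? words[i+1] 0
      · rw [if_pos hc, if_pos ?hpos]
        case hpos =>
          have hc' := hc
          simp only [ne_eq] at hc'
          simp [pChainG, pMism, hgO, hg1O] at hc' ⊢
          tauto
      · rw [if_neg hc, if_neg ?hneg]
        case hneg =>
          have hc' := hc
          simp only [ne_eq] at hc'
          simp [pChainG, pMism, hgO, hg1O] at hc' ⊢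
          tauto
        have := ih (i+1) (by omega)
        rw [← List.drop_eq_getElem_cons h2]
        exact this
    · rw [List.drop_eq_getElem_cons hi,
        List.drop_eq_nil_of_le (show words.length ≤ i + 1 by omega)]
      rw [firstFrom_eq, if_neg (by omega)]
      rfl

lemma findDup_eq (words : List String) :
    ∀ m i s, words.length - i = m →
      (∀ w : String, w ∈ s ↔ w ∈ words.take i) →
      findDupIdx (words.drop i) i s = firstFrom words.length (pDup words) i := by
  intro m
  induction m with
  | zero =>
    intro i s h hs
    rw [List.drop_eq_nil_of_le (by omega), firstFrom_eq, if_neg (by omega)]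
    rfl
  | succ m ih =>
    intro i s h hs
    have hi : i < words.length := by omega
    have hget : words.getD i "" = words[i] := List.getD_eq_getElem _ _ hi
    have hcont : PySem.Set.contains s words[i] = pDup words i := by
      by_cases hd : words[i] ∈ words.take i
      · rw [(PySem.Set.contains_iff _ _).mpr ((hs _).mpr hd)]
        unfold pDup
        rw [hget]
        simp [hd]
      · have h1 : PySem.Set.contains s words[i] = false := by
          cases hcb : PySem.Set.contains s words[i] with
          | false => rfl
          | true => exact absurd ((hs _).mp ((PySem.Set.contains_iff _ _).mp hcb)) hd
        rw [h1]
        unfold pDup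
        rw [hget]
        simp [hd]
    rw [List.drop_eq_getElem_cons hi]
    simp only [findDupIdx]
    rw [firstFrom_eq, if_pos hi, hcont]
    by_cases hd : pDup words i = true
    · rw [if_pos hd, if_pos hd]
    · rw [if_neg hd, if_neg hd]
      refine ih (i+1) _ (by omega) ?_
      intro w
      rw [PySem.Set.mem_add, hs w, List.take_add_one, List.getElem?_eq_getElem hi,
        Option.toList_some, List.mem_append, List.mem_singleton]

lemma min?_filterMap3 (a b c : Option Nat) :
    ([a, b, c].filterMap id).min? = min2 a (min2 b c) := by
  rcases a with _ | x <;> rcases b with _ | y <;> rcases c with _ | z <;>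
    simp [min2, List.min?]

-- ===== VERDICT (by name: the statement is the Claim_ definition above) =====
theorem solution_spec : Claim_equal_solution := by
  unfold Claim_equal_solution
  intro n words _ _
  unfold Spec_solution
  have hA : solution n words = resOf n (firstFrom words.length (pAll words) 0) := by
    refine loopA_eq n words words.length 0 none PySem.Set.empty (by omega) rfl ?_
    intro w
    simp [PySem.Set.empty]
  have hS : findShortIdx words 0 = firstFrom words.length (pShort words) 0 := by
    have := findShort_eq words words.length 0 (by omega)
    simpa using this
  have hC : findChainIdx words 0 = firstFrom words.length (pChainG words) 1 := by
    have := findChain_eq words words.length 0 (by omega)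
    simpa using this
  have hD : findDupIdx words 0 PySem.Set.empty = firstFrom words.length (pDup words) 0 := by
    have := findDup_eq words words.length 0 PySem.Set.empty (by omega) (by intro w; simp [PySem.Set.empty])
    simpa using this
  have h1 : firstFrom words.length (fun k => (decide (1 ≤ k) && pChainG words k) || pDup words k) 0
      = min2 (firstFrom words.length (fun k => decide (1 ≤ k) && pChainG words k) 0)
          (firstFrom words.length (pDup words) 0) :=
    firstFrom_or words.length _ _ words.length 0 rfl
  have h2 : firstFrom words.length
        (fun k => pShort words k || ((decide (1 ≤ k) && pChainG words k) || pDup words k)) 0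
      = min2 (firstFrom words.length (pShort words) 0)
          (firstFrom words.length (fun k => (decide (1 ≤ k) && pChainG words k) || pDup words k) 0) :=
    firstFrom_or words.length _ _ words.length 0 rfl
  have hcomb : firstFrom words.length (pAll words) 0
      = min2 (firstFrom words.length (pShort words) 0)
          (min2 (firstFrom words.length (pChainG words) 1)
            (firstFrom words.length (pDup words) 0)) := by
    rw [firstFrom_congr words.length (pAll words) _ words.length 0 rfl
        (fun k _ => pAll_eq_guarded words k), h2, h1, firstFrom_shift]
  have hB : solution_alt n words
      = resOf n (min2 (firstFrom words.length (pShort words) 0)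
          (min2 (firstFrom words.length (pChainG words) 1)
            (firstFrom words.length (pDup words) 0))) := by
    simp only [solution_alt]
    rw [hS, hC, hD, min?_filterMap3]
    cases min2 (firstFrom words.length (pShort words) 0)
        (min2 (firstFrom words.length (pChainG words) 1)
          (firstFrom words.length (pDup words) 0)) with
    | none => rfl
    | some k => rfl
  rw [hA, hcomb, hB]
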